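-- pv_equiv track=rewrite | github.com/YashDhirajOza/Agentic-AI-Code-Review-System-II | main.py | _add_docstring
-- ===== SOURCE A (Python) =====
-- def _add_docstring(test_code: str, description: str) -> str:
--     lines = test_code.split('\n')
--     for i, line in enumerate(lines):
--         if line.strip().startswith('def test_'):
--             lines.insert(i + 1, f'    """')
--             lines.insert(i + 2, f'    {description}')
--             lines.insert(i + 3, f'    """')
--             break
--     return '\n'.join(lines)
-- ===== SOURCE B (Python) =====
-- def _add_docstring(test_code: str, description: str) -> str:
--     def patched(lines):
--         if not lines:
--             return []
--         head, rest = lines[0], lines[1:]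
--         if head.strip().startswith('def test_'):
--             return [head, '    """', f'    {description}', '    """'] + rest
--         return [head] + patched(rest)
--     return '\n'.join(patched(test_code.split('\n')))
-- ===== Notes on version B (the rewrite author's own statement) =====
-- stated objective: alternative
-- what changed: Replaces the indexed for-loop that mutates the line list in place with three positional inserts and a break by a pure structural recursion that rebuilds the line list, splicing the docstring right after the first matching head.
import Mathlib
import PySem

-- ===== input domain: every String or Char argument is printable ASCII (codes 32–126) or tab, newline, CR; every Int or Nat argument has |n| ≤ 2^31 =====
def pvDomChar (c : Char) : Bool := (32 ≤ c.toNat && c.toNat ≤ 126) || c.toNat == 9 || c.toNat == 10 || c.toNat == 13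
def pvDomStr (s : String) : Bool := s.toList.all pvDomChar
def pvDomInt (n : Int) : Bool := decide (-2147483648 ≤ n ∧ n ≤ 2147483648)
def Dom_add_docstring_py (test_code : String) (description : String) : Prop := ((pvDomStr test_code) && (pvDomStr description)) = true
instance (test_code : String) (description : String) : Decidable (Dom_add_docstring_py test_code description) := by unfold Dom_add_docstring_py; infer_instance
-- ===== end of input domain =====

-- B replaces A's indexed loop with three in-place positional inserts and a break by a pure structural recursion that rebuilds the line list; same return value (A mutates only its local list).

-- ===== PORT A =====
-- line.strip().startswith('def test_')
def pvCondA (line : String) : Bool :=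
  PySem.Str.startswith (PySem.Str.strip line) "def test_"

-- test_code.split('\n'); sep "\n" ≠ "" so split? is always some, .getD [] is unreachable
def pvSplitLines (s : String) : List String :=
  (PySem.Str.split? s "\n").getD []

-- the 'for i, line in enumerate(lines): if …: insert; insert; insert; break' loop
-- ('lines' is mutated and then the loop breaks immediately)
def pvLoopA (description : String) (lines : List String) : List (Int × String) → List String
  | [] => lines
  | (i, line) :: rest =>
    if pvCondA line then
      PySem.List.insert
        (PySem.List.insert
          (PySem.List.insert lines (i + 1) "    \"\"\"")
          (i + 2) ("    " ++ description))
        (i + 3) "    \"\"\""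
    else pvLoopA description lines rest

def add_docstring_py (test_code : String) (description : String) : String :=
  let lines := pvSplitLines test_code
  PySem.Str.join "\n" (pvLoopA description lines (PySem.List.enumerate lines))

-- ===== PORT B =====
-- recursive rebuild: splice the docstring after the first matching head
def pvPatched (description : String) : List String → List String
  | [] => []
  | head :: rest =>
    if PySem.Str.startswith (PySem.Str.strip head) "def test_" then
      head :: "    \"\"\"" :: ("    " ++ description) :: "    \"\"\"" :: rest
    else head :: pvPatched description rest

def add_docstring_py_alt (test_code : String) (description : String) : String :=
  PySem.Str.join "\n" (pvPatched description (pvSplitLines test_code))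

-- ===== PRECONDITION & SPEC =====
def Spec_add_docstring_py (test_code : String) (description : String) (out : String) : Prop := out = add_docstring_py_alt test_code description
instance (test_code : String) (description : String) (out : String) : Decidable (Spec_add_docstring_py test_code description out) := by unfold Spec_add_docstring_py; infer_instance

-- ===== CLAIM (what is proved, stated in full; the proofs are below) =====
def Claim_equal_add_docstring_py : Prop := ∀ (test_code : String) (description : String), Dom_add_docstring_py test_code description → Spec_add_docstring_py test_code description (add_docstring_py test_code description)

-- ===== LEMMAS AND PROOFS =====
-- inserting at the junction of an append splices the element in
lemma pvInsert_at_split {α : Type} (u v : List α) (x : α) :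
    PySem.List.insert (u ++ v) ((u.length : Nat) : Int) x = u ++ x :: v := by
  rw [PySem.List.insert_natCast _ _ _ (by simp)]
  simp

-- A's loop over 'enumerate', started after a matchless prefix 'pre', agrees with B's recursion on the rest
lemma pvLoop_eq_patched (d : String) (pre cur : List String)
    (hpre : ∀ x ∈ pre, pvCondA x = false) :
    pvLoopA d (pre ++ cur) (PySem.List.enumerate cur (pre.length : Int)) =
      pre ++ pvPatched d cur := by
  induction cur generalizing pre with
  | nil => simp [PySem.List.enumerate, pvLoopA, pvPatched]
  | cons h t ih =>
    rw [PySem.List.enumerate_cons]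
    by_cases hc : pvCondA h
    · simp only [pvLoopA, pvPatched, pvCondA] at *
      rw [if_pos hc, if_pos hc]
      have e1 : pre ++ h :: t = (pre ++ [h]) ++ t := by simp
      have e2 : (pre.length : Int) + 1 = (((pre ++ [h]).length : Nat) : Int) := by
        simp
      rw [e1, e2, pvInsert_at_split]
      have e3 : (pre ++ [h]) ++ "    \"\"\"" :: t = (pre ++ [h, "    \"\"\""]) ++ t := by simp
      have e4 : (pre.length : Int) + 2 = (((pre ++ [h, "    \"\"\""]).length : Nat) : Int) := by
        simp
      rw [e3, e4, pvInsert_at_split]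
      have e5 : (pre ++ [h, "    \"\"\""]) ++ ("    " ++ d) :: t =
          (pre ++ [h, "    \"\"\"", "    " ++ d]) ++ t := by simp
      have e6 : (pre.length : Int) + 3 = (((pre ++ [h, "    \"\"\"", "    " ++ d]).length : Nat) : Int) := by
        simp
      rw [e5, e6, pvInsert_at_split]
      simp
    · have e1 : pre ++ h :: t = (pre ++ [h]) ++ t := by simp
      have e2 : (pre.length : Int) + 1 = (((pre ++ [h]).length : Nat) : Int) := by simp
      have hc' : PySem.Chars.startswith (PySem.Chars.strip h.toList)
          ['d','e','f',' ','t','e','s','t','_'] = false := by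
        simpa [pvCondA] using hc
      simp only [pvLoopA, hc, if_neg, Bool.false_eq_true, not_false_eq_true]
      rw [e1, e2, ih (pre ++ [h]) ?_]
      · simp [pvPatched, hc']
      · intro x hx
        rcases List.mem_append.1 hx with h1 | h1
        · exact hpre x h1
        · have : x = h := by simpa using h1
          subst this
          simpa using hc

-- ===== VERDICT (by name: the statement is the Claim_ definition above) =====
theorem add_docstring_py_spec : Claim_equal_add_docstring_py := by
  intro tc d _
  unfold Spec_add_docstring_py add_docstring_py add_docstring_py_alt
  exact congrArg (PySem.Str.join "\n")
    (by simpa using pvLoop_eq_patched d [] (pvSplitLines tc) (by intro x hx; simp at hx))
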